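-- pv_equiv track=rewrite | github.com/MaximRas/samples | tools/__init__.py | sort_list_of_dicts
-- ===== SOURCE A (Python) =====
-- from typing import Any
-- from typing import Iterable
-- from typing import Mapping
--
-- def sort_list_of_dicts(schema: Iterable[Mapping[str, Any]]) -> Iterable[Mapping[str, Any]]:
--     key_to_dict = {}
--     for item in schema:
--         key = list(item.keys())[0]
--         key_to_dict[key] = item
--     result = []
--     for key in sorted(key_to_dict.keys()):
--         result.append(key_to_dict[key])
--     return result
-- ===== SOURCE B (Python) =====
-- def sort_list_of_dicts(schema):
--     keyed = [(list(item.keys())[0], item) for item in schema]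
--     keyed.sort(key=lambda p: p[0])  # stable: ties keep input order
--     result = []
--     prev = None
--     for k, item in keyed:
--         if k == prev:
--             result[-1] = item   # later occurrence overrides, like the dict did
--         else:
--             result.append(item)
--         prev = k
--     return result
-- ===== Notes on version B (the rewrite author's own statement) =====
-- stated objective: alternative
-- what changed: B replaces A's dict-building pass (last insert wins, then map over sorted keys) by a stable sort of the whole (first-key, item) list followed by one linear sweep that keeps the last item of each equal-key run.
import Mathlib
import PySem

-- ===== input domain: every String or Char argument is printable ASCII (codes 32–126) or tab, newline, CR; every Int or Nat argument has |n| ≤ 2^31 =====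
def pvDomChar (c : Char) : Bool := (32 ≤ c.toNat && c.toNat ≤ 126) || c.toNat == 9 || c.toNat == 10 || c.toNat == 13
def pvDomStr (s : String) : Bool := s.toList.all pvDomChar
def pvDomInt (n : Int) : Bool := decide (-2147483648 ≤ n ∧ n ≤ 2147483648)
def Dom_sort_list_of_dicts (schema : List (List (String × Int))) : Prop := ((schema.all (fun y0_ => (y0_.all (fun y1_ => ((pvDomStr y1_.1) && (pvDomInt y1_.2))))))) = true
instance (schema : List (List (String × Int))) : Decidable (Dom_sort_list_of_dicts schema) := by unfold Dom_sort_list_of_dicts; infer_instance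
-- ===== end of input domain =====

-- B replaces A's dict-building pass by a stable sort of the (first-key, item) pairs plus one
-- keep-last-of-each-run sweep; a different algorithm of the same cost ("alternative").

-- ===== PORT A =====
-- key = list(item.keys())[0]; key_to_dict[key] = item; then append key_to_dict[key] for sorted keys.
def sort_list_of_dicts (schema : List (List (String × Int))) : List (List (String × Int)) :=
  let ktd : PySem.Dict String (List (String × Int)) :=
    schema.foldl (fun d item =>
      match PySem.List.pyGet? (item.map Prod.fst) 0 with
      | some key => d.insert key item
      | none => d) PySem.Dict.empty   -- none = IndexError on an empty dict; excluded by Pre_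
  (PySem.List.sorted ktd.keys (fun k => k) false).foldl
    (fun result key => result ++ [ktd.getD key []]) []

-- ===== PORT B =====
-- keyed = [(list(item.keys())[0], item) for item in schema]  (none = IndexError, excluded by Pre_)
def altKeyed : List (List (String × Int)) → Option (List (String × List (String × Int)))
  | [] => some []
  | item :: rest =>
    match PySem.List.pyGet? (item.map Prod.fst) 0 with
    | none => none
    | some k => (altKeyed rest).map (fun t => (k, item) :: t)

-- the sweep: append each item, but overwrite the last slot when the key repeats
def altFold : Option String → List (List (String × Int)) → List (String × List (String × Int)) → List (List (String × Int))
  | _, acc, [] => acc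
  | prev, acc, (k, item) :: rest =>
    if prev = some k then altFold (some k) (acc.dropLast ++ [item]) rest
    else altFold (some k) (acc ++ [item]) rest

def sort_list_of_dicts_alt (schema : List (List (String × Int))) : List (List (String × Int)) :=
  match altKeyed schema with
  | none => []
  | some keyed => altFold none [] (PySem.List.sorted keyed (fun p => p.1) false)

-- ===== PRECONDITION & SPEC =====
-- Pre_ excludes schemas containing an empty dict: there `list(item.keys())[0]` raises IndexError (in A and in B alike).
def Pre_sort_list_of_dicts (schema : List (List (String × Int))) : Prop :=
  ∀ item ∈ schema, item ≠ []
instance (schema : List (List (String × Int))) : Decidable (Pre_sort_list_of_dicts schema) := by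
  unfold Pre_sort_list_of_dicts; infer_instance
def pvWitness_sort_list_of_dicts : (List (List (String × Int))) :=
  [[("b", 1)], [("a", 2)], [("b", 3), ("c", 4)]]
def Spec_sort_list_of_dicts (schema : List (List (String × Int))) (out : List (List (String × Int))) : Prop := out = sort_list_of_dicts_alt schema
instance (schema : List (List (String × Int))) (out : List (List (String × Int))) : Decidable (Spec_sort_list_of_dicts schema out) := by unfold Spec_sort_list_of_dicts; infer_instance

-- ===== CLAIM (what is proved, stated in full; the proofs are below) =====
def Claim_equal_sort_list_of_dicts : Prop := ∀ (schema : List (List (String × Int))), Dom_sort_list_of_dicts schema → Pre_sort_list_of_dicts schema → Spec_sort_list_of_dicts schema (sort_list_of_dicts schema)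

-- ===== LEMMAS AND PROOFS =====

-- first key of a nonempty item
def fKey (it : List (String × Int)) : String := (it.headD ("", 0)).1

-- the last item of schema whose first key is k (or [] if none)
def lastWith (schema : List (List (String × Int))) (k : String) : List (String × Int) :=
  ((schema.filter (fun it => fKey it == k)).getLast?).getD []

-- the canonical value both programs compute: sorted distinct first keys, each mapped to the
-- last input item carrying it
def canon (schema : List (List (String × Int))) : List (List (String × Int)) :=
  (PySem.List.sorted (PySem.Set.ofList (schema.map fKey)) (fun k => k) false).map (lastWith schema)

theorem pyGet?_fKey (it : List (String × Int)) (h : it ≠ []) :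
    PySem.List.pyGet? (it.map Prod.fst) 0 = some (fKey it) := by
  cases it with
  | nil => exact absurd rfl h
  | cons x t => simp [PySem.List.pyGet?, PySem.List.pyIdx?, fKey]

theorem getD_insert_fold (l : List (List (String × Int))) (d : PySem.Dict String (List (String × Int))) (k : String) :
    (l.foldl (fun d it => d.insert (fKey it) it) d).getD k [] =
      ((l.filter (fun it => fKey it == k)).getLast?).getD (d.getD k []) := by
  induction l generalizing d with
  | nil => simp
  | cons x t ih =>
    simp only [List.foldl_cons, List.filter_cons]
    rw [ih]
    by_cases hk : (fKey x == k) = true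
    · have hk' : fKey x = k := eq_of_beq hk
      simp only [hk, if_true]
      cases hF : t.filter (fun it => fKey it == k) with
      | nil => simp [hk'.symm]
      | cons y ys => simp [List.getLast?_cons]
    · have hk' : fKey x ≠ k := by simpa using hk
      simp only [hk]
      congr 1
      rw [PySem.Dict.getD_insert, if_neg (fun h => hk' h.symm)]

theorem A_eq_canon (schema : List (List (String × Int))) (h : Pre_sort_list_of_dicts schema) :
    sort_list_of_dicts schema = canon schema := by
  unfold sort_list_of_dicts canon
  have hfold : schema.foldl (fun d item =>
      match PySem.List.pyGet? (item.map Prod.fst) 0 with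
      | some key => d.insert key item
      | none => d) PySem.Dict.empty
      = schema.foldl (fun d it => d.insert (fKey it) it) PySem.Dict.empty := by
    apply PySem.List.foldl_congr_mem
    intro acc x hx
    rw [pyGet?_fKey x (h x hx)]
  rw [hfold]
  rw [PySem.List.foldl_append_singleton_eq_map (fun key =>
    (schema.foldl (fun d it => d.insert (fKey it) it) PySem.Dict.empty).getD key [])]
  rw [List.nil_append]
  have hkeys : (schema.foldl (fun d it => d.insert (fKey it) it) PySem.Dict.empty).keys
      = PySem.Set.ofList (schema.map fKey) := by
    rw [PySem.Dict.keys_foldl_insert_key schema fKey (fun _ it => it) PySem.Dict.empty]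
    rw [PySem.Dict.keys_empty, ← PySem.Set.update_empty]
    rfl
  rw [hkeys]
  apply List.map_congr_left
  intro k _
  rw [getD_insert_fold, PySem.Dict.getD_empty]
  rfl

theorem altKeyed_some (schema : List (List (String × Int))) (h : Pre_sort_list_of_dicts schema) :
    altKeyed schema = some (schema.map (fun it => (fKey it, it))) := by
  induction schema with
  | nil => rfl
  | cons x t ih =>
    simp only [altKeyed, pyGet?_fKey x (h x (by simp)), List.map_cons]
    rw [ih (fun it hit => h it (by simp [hit]))]
    rfl

-- stability of one insertion step into a sorted accumulator
theorem filter_insertBy (x : String × List (String × Int)) (ys : List (String × List (String × Int)))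
    (hs : ys.Pairwise (fun a b => a.1 ≤ b.1)) (k : String) :
    (PySem.List.insertBy (fun a b => decide (a.1 < b.1)) x ys).filter (fun p => p.1 == k)
      = ys.filter (fun p => p.1 == k) ++ (if x.1 == k then [x] else []) := by
  induction ys with
  | nil => simp [PySem.List.insertBy, List.filter_cons]
  | cons y ys ih =>
    simp only [PySem.List.insertBy]
    by_cases hlt : x.1 < y.1
    · rw [if_pos (decide_eq_true hlt)]
      by_cases hxk : (x.1 == k) = true
      · have hk : k = x.1 := (eq_of_beq hxk).symm
        have hnil : (y :: ys).filter (fun p => p.1 == k) = [] := by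
          rw [List.filter_eq_nil_iff]
          intro p hp hpk
          have hyp : y.1 ≤ p.1 := by
            rcases List.mem_cons.1 hp with rfl | hp'
            · exact le_refl _
            · exact (List.pairwise_cons.1 hs).1 p hp'
          have hpk' : p.1 = k := eq_of_beq hpk
          rw [hpk', hk] at hyp
          exact absurd (lt_of_lt_of_le hlt hyp) (lt_irrefl _)
        simp [hxk, hnil]
      · simp [List.filter_cons, hxk]
    · rw [if_neg (by simpa using hlt)]
      rw [List.filter_cons, List.filter_cons, ih (List.pairwise_cons.1 hs).2]
      by_cases hyk : (y.1 == k) = true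
      · simp [hyk]
      · simp [hyk]

-- stability: sorting by first key does not change the subsequence of any fixed key
theorem filter_sorted (l : List (String × List (String × Int))) (k : String) :
    (PySem.List.sorted l (fun p => p.1) false).filter (fun p => p.1 == k)
      = l.filter (fun p => p.1 == k) := by
  induction l using List.reverseRecOn with
  | nil => rfl
  | append_singleton t x ih =>
    have hsnoc : PySem.List.sorted (t ++ [x]) (fun p => p.1) false
        = PySem.List.insertBy (fun a b => decide (a.1 < b.1)) x
            (PySem.List.sorted t (fun p => p.1) false) := by
      rw [PySem.List.sorted_eq_foldl_insertBy, PySem.List.sorted_eq_foldl_insertBy,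
        List.foldl_append]
      rfl
    rw [hsnoc, filter_insertBy x _ (PySem.List.sorted_pairwise t (fun p => p.1)) k,
      ih, List.filter_append]
    simp [List.filter_cons]

-- ordered dedup of a weakly increasing list is strictly increasing
theorem ofList_pairwise_lt (l : List String) (h : l.Pairwise (· ≤ ·)) :
    (PySem.Set.ofList l).Pairwise (· < ·) := by
  induction l with
  | nil => simp [PySem.Set.ofList]
  | cons a l ih =>
    rw [PySem.Set.ofList_cons]
    refine List.pairwise_cons.2 ⟨?_, ?_⟩
    · intro y hy
      have hy' := List.mem_filter.1 hy
      have hyl : y ∈ l := (PySem.Set.mem_ofList l y).1 hy'.1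
      have hay : a ≤ y := (List.pairwise_cons.1 h).1 y hyl
      have hne : y ≠ a := by simpa using hy'.2
      exact lt_of_le_of_ne hay (fun e => hne e.symm)
    · exact List.Pairwise.filter _ (ih (List.pairwise_cons.1 h).2)

theorem concat_of_mem_ub (L : List String) (hL : L.Pairwise (· < ·)) (k : String)
    (hk : k ∈ L) (hub : ∀ y ∈ L, y ≤ k) : ∃ L', L = L' ++ [k] ∧ k ∉ L' := by
  rcases List.eq_nil_or_concat L with rfl | ⟨L', b, rfl⟩
  · simp at hk
  · rw [List.concat_eq_append] at *
    have hpw := List.pairwise_append.1 hL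
    have hkb : k = b := by
      rcases List.mem_append.1 hk with hk' | hk'
      · have h1 : k < b := hpw.2.2 k hk' b (by simp)
        have h2 : b ≤ k := hub b (by simp)
        exact absurd (lt_of_lt_of_le h1 h2) (lt_irrefl _)
      · simpa using hk'
    subst hkb
    exact ⟨L', rfl, fun hmem => absurd (hpw.2.2 k hmem k (by simp)) (lt_irrefl _)⟩

theorem altFold_snoc (s : List (String × List (String × Int))) (x : String × List (String × Int))
    (prev : Option String) (acc : List (List (String × Int))) :
    altFold prev acc (s ++ [x]) =
      (if (match s.getLast? with | some p => some p.1 | none => prev) = some x.1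
       then (altFold prev acc s).dropLast ++ [x.2]
       else altFold prev acc s ++ [x.2]) := by
  induction s generalizing prev acc with
  | nil => simp [altFold]
  | cons y s ih =>
    obtain ⟨yk, yv⟩ := y
    simp only [List.cons_append, altFold]
    by_cases hp : prev = some yk
    · rw [if_pos hp, if_pos hp, ih]
      cases s with
      | nil => simp [altFold]
      | cons z s => simp [List.getLast?_cons]
    · rw [if_neg hp, if_neg hp, ih]
      cases s with
      | nil => simp [altFold]
      | cons z s => simp [List.getLast?_cons]

theorem altFold_char (s : List (String × List (String × Int))) :
    s.Pairwise (fun a b => a.1 ≤ b.1) →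
    altFold none [] s = (PySem.Set.ofList (s.map Prod.fst)).map
      (fun k => ((s.filter (fun p => p.1 == k)).getLast?.map Prod.snd).getD []) := by
  induction s using List.reverseRecOn with
  | nil => intro _; rfl
  | append_singleton t x ih =>
    intro hs
    have hpw := List.pairwise_append.1 hs
    have ht := hpw.1
    have hub : ∀ a ∈ t, a.1 ≤ x.1 := fun a ha => hpw.2.2 a ha x (by simp)
    have hfilt : ∀ k, (t ++ [x]).filter (fun p => p.1 == k)
        = t.filter (fun p => p.1 == k) ++ (if x.1 == k then [x] else []) := by
      intro k
      rw [List.filter_append]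
      simp [List.filter_cons]
    have hmapfst : (t ++ [x]).map Prod.fst = t.map Prod.fst ++ [x.1] := by simp
    rw [altFold_snoc, ih ht, hmapfst, PySem.Set.ofList_append_singleton]
    by_cases hmem : x.1 ∈ t.map Prod.fst
    · -- the key repeats: overwrite the last slot
      obtain ⟨t', m, rfl⟩ : ∃ t' m, t = t' ++ [m] := by
        rcases List.eq_nil_or_concat t with rfl | ⟨t', m, rfl⟩
        · simp at hmem
        · exact ⟨t', m, by simp⟩
      have hmx : m.1 = x.1 := by
        rcases List.mem_map.1 hmem with ⟨q, hq, hqx⟩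
        rcases List.mem_append.1 hq with hq' | hq'
        · have h1 : q.1 ≤ m.1 := (List.pairwise_append.1 ht).2.2 q hq' m (by simp)
          have h2 : m.1 ≤ x.1 := hub m (by simp)
          exact le_antisymm h2 (hqx ▸ h1)
        · simp at hq'; rw [hq'] at hqx; exact hqx
      have hcond : (match (t' ++ [m]).getLast? with | some p => some p.1 | none => (none : Option String)) = some x.1 := by
        rw [List.getLast?_concat]; simp [hmx]
      rw [hcond, if_pos rfl]
      have hadd : (PySem.Set.ofList ((t' ++ [m]).map Prod.fst)).add x.1
          = PySem.Set.ofList ((t' ++ [m]).map Prod.fst) := by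
        unfold PySem.Set.add
        rw [if_pos ((PySem.Set.contains_iff _ _).2 ((PySem.Set.mem_ofList _ _).2 hmem))]
      rw [hadd]
      -- decompose the key set: x.1 is its last element
      have hKlt : (PySem.Set.ofList ((t' ++ [m]).map Prod.fst)).Pairwise (· < ·) := by
        apply ofList_pairwise_lt
        exact List.pairwise_map.2 ht
      have hKub : ∀ y ∈ PySem.Set.ofList ((t' ++ [m]).map Prod.fst), y ≤ x.1 := by
        intro y hy
        rcases List.mem_map.1 ((PySem.Set.mem_ofList _ _).1 hy) with ⟨q, hq, rfl⟩
        exact hub q hq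
      obtain ⟨L', hL', hnotin⟩ := concat_of_mem_ub _ hKlt x.1
        ((PySem.Set.mem_ofList _ _).2 hmem) hKub
      rw [hL']
      simp only [List.map_append, List.map_cons, List.map_nil]
      rw [List.dropLast_concat]
      congr 1
      · apply List.map_congr_left
        intro k hk
        have hkx : ¬ (x.1 == k) = true := by
          simp only [beq_iff_eq]
          intro e; exact hnotin (e ▸ hk)
        rw [hfilt k, if_neg hkx, List.append_nil]
      · rw [hfilt x.1, if_pos (by simp), List.getLast?_concat]
        rfl
    · -- a fresh key: append
      have hcond : (match t.getLast? with | some p => some p.1 | none => (none : Option String)) ≠ some x.1 := by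
        cases hlast : t.getLast? with
        | none => simp
        | some p =>
          intro e
          exact hmem (List.mem_map.2 ⟨p, List.mem_of_getLast? hlast, Option.some_inj.mp e⟩)
      rw [if_neg hcond]
      have hadd : (PySem.Set.ofList (t.map Prod.fst)).add x.1
          = PySem.Set.ofList (t.map Prod.fst) ++ [x.1] := by
        unfold PySem.Set.add
        rw [if_neg (by rw [PySem.Set.contains_iff, PySem.Set.mem_ofList]; exact hmem)]
      rw [hadd, List.map_append]
      congr 1
      · apply List.map_congr_left
        intro k hk
        have hkx : ¬ (x.1 == k) = true := by
          simp only [beq_iff_eq]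
          intro e
          exact hmem (e ▸ (PySem.Set.mem_ofList _ _).1 hk)
        rw [hfilt k, if_neg hkx, List.append_nil]
      · simp only [List.map_cons, List.map_nil]
        have hnil : t.filter (fun p => p.1 == x.1) = [] := by
          rw [List.filter_eq_nil_iff]
          intro p hp hpk
          exact hmem (List.mem_map.2 ⟨p, hp, eq_of_beq hpk⟩)
        rw [hfilt x.1, if_pos (by simp), hnil, List.nil_append]
        rfl

theorem B_eq_canon (schema : List (List (String × Int))) (h : Pre_sort_list_of_dicts schema) :
    sort_list_of_dicts_alt schema = canon schema := by
  unfold sort_list_of_dicts_alt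
  rw [altKeyed_some schema h]
  simp only []
  set pairs := schema.map (fun it => (fKey it, it)) with hpairs
  set s := PySem.List.sorted pairs (fun p => p.1) false with hsdef
  have hs : s.Pairwise (fun a b => a.1 ≤ b.1) := PySem.List.sorted_pairwise pairs (fun p => p.1)
  rw [altFold_char s hs]
  have hpm : pairs.map Prod.fst = schema.map fKey := by
    rw [hpairs, List.map_map]; rfl
  have hkeys : PySem.Set.ofList (s.map Prod.fst)
      = PySem.List.sorted (PySem.Set.ofList (schema.map fKey)) (fun k => k) false := by
    symm
    apply PySem.List.sorted_eq_of_perm_of_pairwise_lt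
    · rw [List.perm_ext_iff_of_nodup (PySem.Set.nodup_ofList _) (PySem.Set.nodup_ofList _)]
      intro k
      rw [PySem.Set.mem_ofList, PySem.Set.mem_ofList, ← hpm]
      constructor
      · intro hk
        rcases List.mem_map.1 hk with ⟨p, hp, rfl⟩
        exact List.mem_map.2 ⟨p, (PySem.List.mem_sorted pairs (fun p => p.1) false p).1 hp, rfl⟩
      · intro hk
        rcases List.mem_map.1 hk with ⟨p, hp, rfl⟩
        exact List.mem_map.2 ⟨p, (PySem.List.mem_sorted pairs (fun p => p.1) false p).2 hp, rfl⟩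
    · exact ofList_pairwise_lt _ (PySem.List.sorted_map_key_pairwise pairs (fun p => p.1))
  rw [hkeys]
  unfold canon
  apply List.map_congr_left
  intro k _
  rw [filter_sorted pairs k, hpairs, List.filter_map]
  have : (fun p => p.1 == k) ∘ (fun it => (fKey it, it)) = fun it => fKey it == k := rfl
  rw [this, List.getLast?_map, Option.map_map]
  unfold lastWith
  cases (List.filter (fun it => fKey it == k) schema).getLast? <;> rfl

-- ===== VERDICT (by name: the statement is the Claim_ definition above) =====
theorem sort_list_of_dicts_spec : Claim_equal_sort_list_of_dicts := by
  intro schema _ hpre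
  unfold Spec_sort_list_of_dicts
  rw [A_eq_canon schema hpre, B_eq_canon schema hpre]
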